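-- pv_equiv track=rewrite | github.com/linshaoyong/leetcode | python/string/0893_groups_of_special-equivalent_strings.py | numSpecialEquivGroups
-- ===== SOURCE A (Python) =====
-- def numSpecialEquivGroups(A):
--     """
--     :type A: List[str]
--     :rtype: int
--     """
--     res = set()
--     for a in A:
--         aa, bb = [], []
--         for i in range(0, len(a)):
--             if i % 2 == 0:
--                 aa.append(a[i])
--             else:
--                 bb.append(a[i])
--         sa = ''.join(sorted(aa))
--         sb = ''.join(sorted(bb))
--         res.add((sa, sb,))
--     return len(res)
-- ===== SOURCE B (Python) =====
-- def numSpecialEquivGroups(A):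
--     signatures = {(''.join(sorted(a[::2])), ''.join(sorted(a[1::2]))) for a in A}
--     return len(signatures)
-- ===== Notes on version B (the rewrite author's own statement) =====
-- stated objective: idiomatic
-- what changed: Replaces A's explicit index-parity loop and manual set accumulation with a one-line set comprehension whose signatures come from the slices a[::2] and a[1::2].
import Mathlib
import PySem

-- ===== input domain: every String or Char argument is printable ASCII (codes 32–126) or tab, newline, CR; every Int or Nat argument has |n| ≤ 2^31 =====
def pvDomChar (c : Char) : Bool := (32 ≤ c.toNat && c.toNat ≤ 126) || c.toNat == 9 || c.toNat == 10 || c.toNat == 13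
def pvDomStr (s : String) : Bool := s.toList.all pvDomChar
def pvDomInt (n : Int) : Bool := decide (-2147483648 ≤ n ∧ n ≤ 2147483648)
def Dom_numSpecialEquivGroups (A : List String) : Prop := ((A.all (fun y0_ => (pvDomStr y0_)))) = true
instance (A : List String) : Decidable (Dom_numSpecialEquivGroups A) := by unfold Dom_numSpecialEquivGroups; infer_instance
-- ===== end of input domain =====

-- B replaces A's explicit index-parity loop and manual set building by a set comprehension
-- over slice-based signatures (a[::2], a[1::2]) — idiomatic, same cost, same results.
-- (''.join over a list of 1-character strings is ported as String.ofList of the char list — exact.)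

-- ===== PORT A =====
def numSpecialEquivGroups (A : List String) : Int :=
  let res : PySem.Set (String × String) :=
    A.foldl (fun res a =>
      -- aa, bb = [], []; for i in range(0, len(a)): parity-append a[i]
      let p := (PySem.List.pyRange 0 (PySem.Str.len a) 1).foldl
        (fun (p : List Char × List Char) i =>
          if PySem.Int.mod i 2 = 0 then (p.1 ++ [PySem.List.pyGetD a.toList i ' '], p.2)
          else (p.1, p.2 ++ [PySem.List.pyGetD a.toList i ' ']))
        ([], [])
      let sa := String.ofList (PySem.List.sorted p.1 (fun c => c) false)
      let sb := String.ofList (PySem.List.sorted p.2 (fun c => c) false)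
      PySem.Set.add res (sa, sb))
      PySem.Set.empty
  PySem.Set.len res

-- ===== PORT B =====
-- {(''.join(sorted(a[::2])), ''.join(sorted(a[1::2]))) for a in A} — a set comprehension is
-- the set of the mapped list in iteration order; the step-2 slice is PySem.List.slice?
-- (step ≠ 0, so it is always `some`; `.getD []` just unwraps it).
def numSpecialEquivGroups_alt (A : List String) : Int :=
  let signatures : PySem.Set (String × String) :=
    PySem.Set.ofList (A.map (fun a =>
      (String.ofList (PySem.List.sorted ((PySem.List.slice? a.toList none none 2).getD []) (fun c => c) false),
       String.ofList (PySem.List.sorted ((PySem.List.slice? a.toList (some 1) none 2).getD []) (fun c => c) false))))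
  PySem.Set.len signatures

-- ===== PRECONDITION & SPEC =====
def Spec_numSpecialEquivGroups (A : List String) (out : Int) : Prop := out = numSpecialEquivGroups_alt A
instance (A : List String) (out : Int) : Decidable (Spec_numSpecialEquivGroups A out) := by unfold Spec_numSpecialEquivGroups; infer_instance

-- ===== CLAIM (what is proved, stated in full; the proofs are below) =====
def Claim_equal_numSpecialEquivGroups : Prop := ∀ (A : List String), Dom_numSpecialEquivGroups A → Spec_numSpecialEquivGroups A (numSpecialEquivGroups A)

-- ===== LEMMAS AND PROOFS =====

-- the even-indexed elements of a list (what a[::2] selects)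
def pvEvens {α : Type} : List α → List α
  | [] => []
  | [a] => [a]
  | a :: _ :: t => a :: pvEvens t

-- A's parity loop, run over any list of (index, char) pairs, appends the even-index
-- characters to the first accumulator and the rest to the second.
theorem pvFoldSplit (l : List (Int × Char)) (aa bb : List Char) :
    l.foldl (fun (p : List Char × List Char) (q : Int × Char) =>
        if PySem.Int.mod q.1 2 = 0 then (p.1 ++ [q.2], p.2) else (p.1, p.2 ++ [q.2])) (aa, bb)
      = (aa ++ (l.filter (fun q => PySem.Int.mod q.1 2 = 0)).map Prod.snd,
         bb ++ (l.filter (fun q => ¬ PySem.Int.mod q.1 2 = 0)).map Prod.snd) := by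
  induction l generalizing aa bb with
  | nil => simp only [List.foldl_nil, List.filter_nil, List.map_nil, List.append_nil]
  | cons q t ih =>
    rw [List.foldl_cons]
    by_cases h : PySem.Int.mod q.1 2 = 0
    · rw [if_pos h, ih, List.filter_cons_of_pos (by simpa using h),
        List.filter_cons_of_neg (by simpa using h)]
      simp only [List.map_cons, List.append_assoc, List.singleton_append]
    · rw [if_neg h, ih, List.filter_cons_of_neg (by simpa using h),
        List.filter_cons_of_pos (by simpa using h)]
      simp only [List.map_cons, List.append_assoc, List.singleton_append]

-- the enumerate-parity split yields exactly the even-indexed elements and the rest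
theorem pvEnumSplit {α : Type} (cs : List α) :
    ∀ (s : Int), PySem.Int.mod s 2 = 0 →
      ((PySem.List.enumerate cs s).filter (fun q => PySem.Int.mod q.1 2 = 0)).map Prod.snd = pvEvens cs ∧
      ((PySem.List.enumerate cs s).filter (fun q => ¬ PySem.Int.mod q.1 2 = 0)).map Prod.snd = pvEvens cs.tail := by
  induction cs using pvEvens.induct with
  | case1 =>
    intro s _
    simp [PySem.List.enumerate_nil, pvEvens]
  | case2 a =>
    intro s hs
    rw [PySem.List.enumerate_cons, PySem.List.enumerate_nil]
    constructor
    · rw [List.filter_cons_of_pos (by simpa using hs)]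
      rfl
    · rw [List.filter_cons_of_neg (by simpa using hs)]
      rfl
  | case3 a b t ih =>
    intro s hs
    have hs' : s % 2 = 0 := by rwa [PySem.Int.mod_eq_emod_of_pos (by norm_num)] at hs
    have h1 : ¬ PySem.Int.mod (s + 1) 2 = 0 := by
      rw [PySem.Int.mod_eq_emod_of_pos (by norm_num)]; omega
    have h2 : PySem.Int.mod (s + 1 + 1) 2 = 0 := by
      rw [PySem.Int.mod_eq_emod_of_pos (by norm_num)]; omega
    obtain ⟨ihe, iho⟩ := ih (s + 1 + 1) h2
    rw [PySem.List.enumerate_cons, PySem.List.enumerate_cons]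
    constructor
    · rw [List.filter_cons_of_pos (by simpa using hs),
        List.filter_cons_of_neg (by simpa using h1), List.map_cons, ihe]
      rfl
    · rw [List.filter_cons_of_neg (by simpa using hs),
        List.filter_cons_of_pos (by simpa using h1), List.map_cons, iho]
      cases t <;> rfl

-- a[::2] picks the even-indexed elements …
theorem pvFmEvens {α : Type} (cs : List α) :
    List.filterMap (fun k => cs[2*k]?) (List.range ((cs.length+1)/2)) = pvEvens cs := by
  induction cs using pvEvens.induct with
  | case1 => simp [pvEvens]
  | case2 a => simp [pvEvens]
  | case3 a b t ih =>
    have hc : ((a :: b :: t).length + 1)/2 = (t.length + 1)/2 + 1 := by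
      simp only [List.length_cons]; omega
    rw [hc, List.range_succ_eq_map, List.filterMap_cons, List.filterMap_map]
    have hf : (fun k => (a :: b :: t)[2*k]?) ∘ Nat.succ = fun k => t[2*k]? := by
      funext k
      simp only [Function.comp_apply]
      have h2 : 2 * Nat.succ k = 2*k + 2 := by omega
      rw [h2]
      rfl
    rw [hf, ih]
    rfl

theorem pvSliceEvens {α : Type} (cs : List α) :
    PySem.List.slice? cs none none 2 = some (pvEvens cs) := by
  simp only [PySem.List.slice?, PySem.List.sliceIndices]
  norm_num
  have hf : (fun x : Nat => cs[((2:Int) * (x:Int)).toNat]?) = fun k => cs[2*k]? := by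
    funext k
    have h : ((2:Int) * (k:Int)).toNat = 2*k := by omega
    rw [h]
  have hc : (if 0 < cs.length then (((cs.length:Int) + 2 - 1)/2).toNat else 0) = (cs.length+1)/2 := by
    split_ifs with h <;> omega
  rw [hf, hc, pvFmEvens]

-- … and a[1::2] the odd-indexed ones (the even-indexed elements of the tail)
theorem pvSliceOdds {α : Type} (cs : List α) :
    PySem.List.slice? cs (some 1) none 2 = some (pvEvens cs.tail) := by
  cases cs with
  | nil => rfl
  | cons c t =>
    simp only [PySem.List.slice?, PySem.List.sliceIndices]
    norm_num
    have hf : (fun x : Nat => (c::t)[((1:Int) + (2:Int) * (x:Int)).toNat]?) = fun k => t[2*k]? := by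
      funext k
      have h : ((1:Int) + (2:Int) * (k:Int)).toNat = 2*k + 1 := by omega
      rw [h]
      rfl
    have hc : (if 0 < t.length then (((t.length:Int) + 2 - 1)/2).toNat else 0) = (t.length+1)/2 := by
      split_ifs with h <;> omega
    rw [hf, hc, pvFmEvens]

-- one iteration of A's outer loop adds exactly B's slice-based signature of that string
theorem pvStep (res : PySem.Set (String × String)) (a : String) :
    PySem.Set.add res
      (String.ofList (PySem.List.sorted
          ((PySem.List.pyRange 0 (PySem.Str.len a) 1).foldl
            (fun (p : List Char × List Char) i =>
              if PySem.Int.mod i 2 = 0 then (p.1 ++ [PySem.List.pyGetD a.toList i ' '], p.2)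
              else (p.1, p.2 ++ [PySem.List.pyGetD a.toList i ' ']))
            ([], [])).1 (fun c => c) false),
       String.ofList (PySem.List.sorted
          ((PySem.List.pyRange 0 (PySem.Str.len a) 1).foldl
            (fun (p : List Char × List Char) i =>
              if PySem.Int.mod i 2 = 0 then (p.1 ++ [PySem.List.pyGetD a.toList i ' '], p.2)
              else (p.1, p.2 ++ [PySem.List.pyGetD a.toList i ' ']))
            ([], [])).2 (fun c => c) false))
      = PySem.Set.add res
          (String.ofList (PySem.List.sorted ((PySem.List.slice? a.toList none none 2).getD []) (fun c => c) false),
           String.ofList (PySem.List.sorted ((PySem.List.slice? a.toList (some 1) none 2).getD []) (fun c => c) false)) := by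
  have hmap :
      (PySem.List.pyRange 0 (PySem.Str.len a) 1).foldl
        (fun (p : List Char × List Char) i =>
          if PySem.Int.mod i 2 = 0 then (p.1 ++ [PySem.List.pyGetD a.toList i ' '], p.2)
          else (p.1, p.2 ++ [PySem.List.pyGetD a.toList i ' ']))
        ([], [])
      = (PySem.List.enumerate a.toList).foldl
        (fun (p : List Char × List Char) (q : Int × Char) =>
          if PySem.Int.mod q.1 2 = 0 then (p.1 ++ [q.2], p.2) else (p.1, p.2 ++ [q.2]))
        ([], []) := by
    rw [PySem.List.enumerate_eq_map_pyRange a.toList ' ', List.foldl_map]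
    simp only [PySem.Str.len_eq, PySem.List.len]
  obtain ⟨he, ho⟩ := pvEnumSplit a.toList 0 (by decide)
  rw [hmap, pvFoldSplit, pvSliceEvens, pvSliceOdds]
  simp only [List.nil_append, he, ho, Option.getD_some]

-- A's whole outer loop builds exactly the set of B's signatures
theorem pvOuter (A : List String) (s : PySem.Set (String × String)) :
    A.foldl (fun res a =>
        PySem.Set.add res
          (String.ofList (PySem.List.sorted
              ((PySem.List.pyRange 0 (PySem.Str.len a) 1).foldl
                (fun (p : List Char × List Char) i =>
                  if PySem.Int.mod i 2 = 0 then (p.1 ++ [PySem.List.pyGetD a.toList i ' '], p.2)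
                  else (p.1, p.2 ++ [PySem.List.pyGetD a.toList i ' ']))
                ([], [])).1 (fun c => c) false),
           String.ofList (PySem.List.sorted
              ((PySem.List.pyRange 0 (PySem.Str.len a) 1).foldl
                (fun (p : List Char × List Char) i =>
                  if PySem.Int.mod i 2 = 0 then (p.1 ++ [PySem.List.pyGetD a.toList i ' '], p.2)
                  else (p.1, p.2 ++ [PySem.List.pyGetD a.toList i ' ']))
                ([], [])).2 (fun c => c) false))) s
      = A.foldl (fun res a =>
          PySem.Set.add res
            (String.ofList (PySem.List.sorted ((PySem.List.slice? a.toList none none 2).getD []) (fun c => c) false),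
             String.ofList (PySem.List.sorted ((PySem.List.slice? a.toList (some 1) none 2).getD []) (fun c => c) false))) s := by
  induction A generalizing s with
  | nil => rfl
  | cons a t ih => rw [List.foldl_cons, List.foldl_cons, pvStep, ih]

-- ===== VERDICT (by name: the statement is the Claim_ definition above) =====
theorem numSpecialEquivGroups_spec : Claim_equal_numSpecialEquivGroups := by
  intro A _
  show numSpecialEquivGroups A = numSpecialEquivGroups_alt A
  simp only [numSpecialEquivGroups, numSpecialEquivGroups_alt]
  rw [pvOuter, ← PySem.Set.update_map_eq_foldl_add, PySem.Set.update_empty]
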